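-- pv_equiv track=rewrite | github.com/arpadpall21/Coding-Challenges | remove NM around/remove NM around.py | removeNMaround
-- ===== SOURCE A (Python) =====
-- def removeNMaround(s):
--     removeMap = [None for _ in range(len(s)+3)]
--
--     for i in range(len(s)):
--         if s[i] == 'M':
--             removeMap[i+1] = 0
--             removeMap[i] = 0
--             continue
--
--         if s[i] == 'N':
--             removeMap[i+3] = 0
--             continue
--
--         if removeMap[i+2] == 0:
--             continue
--
--         removeMap[i+2] = s[i]
--
--     return ''.join([i for i in removeMap if i != None and i != 0])
-- ===== SOURCE B (Python) =====
-- def removeNMaround(s):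
--     n = len(s)
--     return ''.join(
--         c for i, c in enumerate(s)
--         if c != 'M' and c != 'N'
--         and not (i + 1 < n and s[i + 1] == 'M')
--         and not (i + 2 < n and s[i + 2] == 'M')
--         and not (i > 0 and s[i - 1] == 'N')
--     )
-- ===== Notes on version B (the rewrite author's own statement) =====
-- stated objective: simpler
-- what changed: A interleaves marking and storing into an offset-indexed scratch array of None/0/char sentinels and then joins it; B is a single filter over the string keeping each character unless it is M/N, one of the next two characters is M, or the previous character is N.
import Mathlib
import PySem

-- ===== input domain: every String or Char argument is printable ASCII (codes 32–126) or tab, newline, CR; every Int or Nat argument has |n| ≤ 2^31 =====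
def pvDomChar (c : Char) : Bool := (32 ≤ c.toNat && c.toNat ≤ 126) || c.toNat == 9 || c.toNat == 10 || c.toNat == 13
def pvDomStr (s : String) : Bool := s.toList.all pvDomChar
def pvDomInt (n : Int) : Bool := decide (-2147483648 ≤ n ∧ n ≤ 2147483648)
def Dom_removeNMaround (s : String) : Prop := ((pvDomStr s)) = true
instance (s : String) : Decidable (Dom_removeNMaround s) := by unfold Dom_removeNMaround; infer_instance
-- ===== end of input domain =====

-- B replaces A's offset-indexed None/0/char scratch array (mutating marking loop + join)
-- by a single filter over the string with local look-around conditions; objective: simpler.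


-- ===== PORT A =====
-- removeMap's Python values None / 0 / <char> are modelled as
-- none / some none / some (some c).  All list reads and writes of A are at
-- indices < len(s)+3, where List.getD / List.set are exact for Python's
-- removeMap[k] / removeMap[k] = v; likewise s[i] for i < len(s) is cs.getD i ' '.
def removeNMaroundStep (cs : List Char) (m : List (Option (Option Char))) (i : Nat) :
    List (Option (Option Char)) :=
  if cs.getD i ' ' = 'M' then
    (m.set (i+1) (some none)).set i (some none)
  else if cs.getD i ' ' = 'N' then
    m.set (i+3) (some none)
  else if m.getD (i+2) none = some none then
    m
  else
    m.set (i+2) (some (some (cs.getD i ' ')))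

def removeNMaround (s : String) : String :=
  let cs := s.toList
  let m := (List.range cs.length).foldl (removeNMaroundStep cs)
    (List.replicate (cs.length + 3) none)
  String.mk (m.filterMap (fun e => match e with
    | some (some c) => some c
    | _ => none))

-- ===== PORT B =====
def removeNMaround_alt (s : String) : String :=
  let cs := s.toList
  let n : Int := cs.length
  String.mk ((PySem.List.enumerate cs).filterMap (fun p =>
    if p.2 ≠ 'M' ∧ p.2 ≠ 'N' ∧
       ¬(p.1 + 1 < n ∧ PySem.List.pyGetD cs (p.1 + 1) ' ' = 'M') ∧
       ¬(p.1 + 2 < n ∧ PySem.List.pyGetD cs (p.1 + 2) ' ' = 'M') ∧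
       ¬(p.1 > 0 ∧ PySem.List.pyGetD cs (p.1 - 1) ' ' = 'N')
    then some p.2 else none))

-- ===== PRECONDITION & SPEC =====
def Spec_removeNMaround (s : String) (out : String) : Prop := out = removeNMaround_alt s
instance (s : String) (out : String) : Decidable (Spec_removeNMaround s out) := by unfold Spec_removeNMaround; infer_instance

-- ===== CLAIM (what is proved, stated in full; the proofs are below) =====
def Claim_equal_removeNMaround : Prop := ∀ (s : String), Dom_removeNMaround s → Spec_removeNMaround s (removeNMaround s)

-- ===== LEMMAS AND PROOFS =====

-- Z cs i j: after the first i loop iterations of A, slot j has been zeroed.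
abbrev Z (cs : List Char) (i j : Nat) : Prop :=
  ∃ k, k < i ∧ ((cs.getD k ' ' = 'M' ∧ (j = k ∨ j = k + 1)) ∨
                (cs.getD k ' ' = 'N' ∧ j = k + 3))

-- St cs i j: within the first i iterations, a character was stored into slot j.
abbrev St (cs : List Char) (i j : Nat) : Prop :=
  2 ≤ j ∧ j - 2 < i ∧ cs.getD (j-2) ' ' ≠ 'M' ∧ cs.getD (j-2) ' ' ≠ 'N' ∧
  ¬(3 ≤ j ∧ cs.getD (j-3) ' ' = 'N')

-- slot j's content after i iterations
def state (cs : List Char) (i j : Nat) : Option (Option Char) :=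
  if Z cs i j then some none
  else if St cs i j then some (some (cs.getD (j-2) ' '))
  else none

lemma state_congr (cs : List Char) (i i' j : Nat)
    (h1 : Z cs i j ↔ Z cs i' j) (h2 : St cs i j ↔ St cs i' j) :
    state cs i j = state cs i' j := by
  unfold state
  by_cases hz : Z cs i j
  · rw [if_pos hz, if_pos (h1.mp hz)]
  · rw [if_neg hz, if_neg (fun h => hz (h1.mpr h))]
    by_cases hs : St cs i j
    · rw [if_pos hs, if_pos (h2.mp hs)]
    · rw [if_neg hs, if_neg (fun h => hs (h2.mpr h))]

lemma Z_succ (cs : List Char) (i j : Nat) :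
    Z cs (i+1) j ↔ Z cs i j ∨ ((cs.getD i ' ' = 'M' ∧ (j = i ∨ j = i + 1)) ∨
                               (cs.getD i ' ' = 'N' ∧ j = i + 3)) := by
  constructor
  · rintro ⟨k, hk, h⟩
    rcases Nat.lt_succ_iff_lt_or_eq.mp hk with hk' | rfl
    · exact Or.inl ⟨k, hk', h⟩
    · exact Or.inr h
  · rintro (⟨k, hk, h⟩ | h)
    · exact ⟨k, by omega, h⟩
    · exact ⟨i, by omega, h⟩

lemma St_succ (cs : List Char) (i j : Nat) :
    St cs (i+1) j ↔ St cs i j ∨ (j = i + 2 ∧ cs.getD i ' ' ≠ 'M' ∧ cs.getD i ' ' ≠ 'N' ∧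
      ¬(3 ≤ j ∧ cs.getD (j-3) ' ' = 'N')) := by
  unfold St
  constructor
  · rintro ⟨h2, hlt, hM, hN, hprev⟩
    by_cases hc : j - 2 < i
    · exact Or.inl ⟨h2, hc, hM, hN, hprev⟩
    · have hji : j = i + 2 := by omega
      have : j - 2 = i := by omega
      rw [this] at hM hN
      exact Or.inr ⟨hji, hM, hN, hprev⟩
  · rintro (⟨h2, hlt, hM, hN, hprev⟩ | ⟨hji, hM, hN, hprev⟩)
    · exact ⟨h2, by omega, hM, hN, hprev⟩
    · subst hji
      have h : i + 2 - 2 = i := by omega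
      rw [h]
      exact ⟨by omega, by omega, hM, hN, hprev⟩

lemma Z_at_plus_two (cs : List Char) (i : Nat) :
    Z cs i (i+2) ↔ 1 ≤ i ∧ cs.getD (i-1) ' ' = 'N' := by
  constructor
  · rintro ⟨k, hk, ⟨hM, hj⟩ | ⟨hN, hj⟩⟩
    · omega
    · have : k = i - 1 := by omega
      subst this
      exact ⟨by omega, hN⟩
  · rintro ⟨hi, hN⟩
    exact ⟨i - 1, by omega, Or.inr ⟨hN, by omega⟩⟩

lemma base_map (cs : List Char) :
    List.replicate (cs.length + 3) (none : Option (Option Char)) =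
      (List.range (cs.length + 3)).map (state cs 0) := by
  have h : ∀ j, state cs 0 j = none := by
    intro j
    unfold state
    rw [if_neg, if_neg]
    · rintro ⟨_, _, _, _, _⟩; omega
    · rintro ⟨k, hk, _⟩; omega
  calc List.replicate (cs.length + 3) (none : Option (Option Char))
      = (List.range (cs.length + 3)).map (fun _ => none) := by
        rw [List.map_const', List.length_range]
    _ = (List.range (cs.length + 3)).map (state cs 0) := by
        exact (List.map_congr_left (fun j _ => (h j).symm))

lemma step_map (cs : List Char) (i : Nat) (hi : i < cs.length) :
    removeNMaroundStep cs ((List.range (cs.length + 3)).map (state cs i)) i =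
      (List.range (cs.length + 3)).map (state cs (i+1)) := by
  unfold removeNMaroundStep
  by_cases hM : cs.getD i ' ' = 'M'
  · rw [if_pos hM]
    apply List.ext_getElem
    · simp
    · intro j h1 h2
      simp only [List.getElem_set, List.getElem_map, List.getElem_range]
      have hjlen : j < cs.length + 3 := by simpa using h2
      split_ifs with ha hb
      · -- j = i
        subst ha
        unfold state
        rw [if_pos]
        exact ⟨i, by omega, Or.inl ⟨hM, Or.inl rfl⟩⟩
      · -- j = i+1
        subst hb
        unfold state
        rw [if_pos]
        exact ⟨i, by omega, Or.inl ⟨hM, Or.inr rfl⟩⟩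
      · apply state_congr
        · rw [Z_succ]
          constructor
          · exact Or.inl
          · rintro (h | ⟨_, (h|h)⟩ | ⟨hc, _⟩)
            · exact h
            · omega
            · omega
            · rw [hM] at hc; exact absurd hc (by decide)
        · rw [St_succ]
          constructor
          · exact Or.inl
          · rintro (h | ⟨hj, hM', _⟩)
            · exact h
            · exact absurd hM hM'
  · rw [if_neg hM]
    by_cases hN : cs.getD i ' ' = 'N'
    · rw [if_pos hN]
      apply List.ext_getElem
      · simp
      · intro j h1 h2
        simp only [List.getElem_set, List.getElem_map, List.getElem_range]
        split_ifs with ha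
        · subst ha
          unfold state
          rw [if_pos]
          exact ⟨i, by omega, Or.inr ⟨hN, rfl⟩⟩
        · apply state_congr
          · rw [Z_succ]
            constructor
            · exact Or.inl
            · rintro (h | ⟨hc, _⟩ | ⟨_, h⟩)
              · exact h
              · exact absurd hc hM
              · omega
          · rw [St_succ]
            constructor
            · exact Or.inl
            · rintro (h | ⟨hj, _, hN', _⟩)
              · exact h
              · exact absurd hN hN'
    · rw [if_neg hN]
      have hread : ((List.range (cs.length + 3)).map (state cs i)).getD (i+2) none
          = state cs i (i+2) := PySem.List.getD_map_range _ _ _ _ (by omega)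
      have hSti : ¬ St cs i (i+2) := by
        rintro ⟨_, hlt, _⟩; omega
      by_cases hz : Z cs i (i+2)
      · have : state cs i (i+2) = some none := by unfold state; rw [if_pos hz]
        rw [hread, this, if_pos rfl]
        apply List.map_congr_left
        intro j hj
        apply state_congr
        · rw [Z_succ]
          constructor
          · exact Or.inl
          · rintro (h | ⟨hc, _⟩ | ⟨hc, _⟩)
            · exact h
            · exact absurd hc hM
            · exact absurd hc hN
        · rw [St_succ]
          constructor
          · exact Or.inl
          · rintro (h | ⟨hj2, _, _, hprev⟩)
            · exact h
            · exfalso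
              rcases (Z_at_plus_two cs i).mp hz with ⟨hi1, hN1⟩
              exact hprev ⟨by omega, by rw [show j - 3 = i - 1 by omega]; exact hN1⟩
      · have : state cs i (i+2) ≠ some none := by
          unfold state
          rw [if_neg hz, if_neg hSti]
          exact fun h => by cases h
        rw [hread, if_neg this]
        apply List.ext_getElem
        · simp
        · intro j h1 h2
          simp only [List.getElem_set, List.getElem_map, List.getElem_range]
          split_ifs with ha
          · subst ha
            unfold state
            rw [if_neg, if_pos]
            · rw [show i + 2 - 2 = i by omega]
            · refine ⟨by omega, by omega, hM, hN, ?_⟩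
              rintro ⟨h3, hNprev⟩
              exact hz ((Z_at_plus_two cs i).mpr ⟨by omega, by rwa [show i + 2 - 3 = i - 1 by omega] at hNprev⟩)
            · rw [Z_succ]
              rintro (h | ⟨hc, _⟩ | ⟨_, h⟩)
              · exact hz h
              · exact hM hc
              · omega
          · apply state_congr
            · rw [Z_succ]
              constructor
              · exact Or.inl
              · rintro (h | ⟨hc, _⟩ | ⟨hc, _⟩)
                · exact h
                · exact absurd hc hM
                · exact absurd hc hN
            · rw [St_succ]
              constructor
              · exact Or.inl
              · rintro (h | ⟨hj2, _⟩)
                · exact h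
                · omega

lemma loopA_eq (cs : List Char) (i : Nat) (hi : i ≤ cs.length) :
    (List.range i).foldl (removeNMaroundStep cs) (List.replicate (cs.length + 3) none) =
      (List.range (cs.length + 3)).map (state cs i) := by
  induction i with
  | zero => simpa using base_map cs
  | succ i ih =>
    rw [List.range_succ, List.foldl_append, List.foldl_cons, List.foldl_nil,
        ih (by omega)]
    exact step_map cs i (by omega)

-- B's keep-condition, in Nat form
abbrev keep (cs : List Char) (t : Nat) : Prop :=
  cs.getD t ' ' ≠ 'M' ∧ cs.getD t ' ' ≠ 'N' ∧
  ¬(t + 1 < cs.length ∧ cs.getD (t+1) ' ' = 'M') ∧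
  ¬(t + 2 < cs.length ∧ cs.getD (t+2) ' ' = 'M') ∧
  ¬(0 < t ∧ cs.getD (t-1) ' ' = 'N')

def projA (e : Option (Option Char)) : Option Char :=
  match e with
  | some (some c) => some c
  | _ => none

lemma projA_of_not_St (cs : List Char) (i j : Nat) (h : ¬ St cs i j) :
    projA (state cs i j) = none := by
  unfold state
  by_cases hz : Z cs i j
  · rw [if_pos hz]; rfl
  · rw [if_neg hz, if_neg h]; rfl

lemma Z_final (cs : List Char) (t : Nat) (ht : t < cs.length) :
    Z cs cs.length (t+2) ↔ (t + 2 < cs.length ∧ cs.getD (t+2) ' ' = 'M') ∨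
      (t + 1 < cs.length ∧ cs.getD (t+1) ' ' = 'M') ∨
      (0 < t ∧ cs.getD (t-1) ' ' = 'N') := by
  constructor
  · rintro ⟨k, hk, ⟨hM, (h|h)⟩ | ⟨hN, h⟩⟩
    · exact Or.inl ⟨by omega, by rw [← h] at hM; exact hM⟩
    · exact Or.inr (Or.inl ⟨by omega, by rw [show t+1 = k by omega]; exact hM⟩)
    · exact Or.inr (Or.inr ⟨by omega, by rw [show t-1 = k by omega]; exact hN⟩)
  · rintro (⟨h1, h2⟩ | ⟨h1, h2⟩ | ⟨h1, h2⟩)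
    · exact ⟨t+2, h1, Or.inl ⟨h2, Or.inl rfl⟩⟩
    · exact ⟨t+1, h1, Or.inl ⟨h2, Or.inr rfl⟩⟩
    · exact ⟨t-1, by omega, Or.inr ⟨h2, by omega⟩⟩

lemma St_final (cs : List Char) (t : Nat) (ht : t < cs.length) :
    St cs cs.length (t+2) ↔ (cs.getD t ' ' ≠ 'M' ∧ cs.getD t ' ' ≠ 'N' ∧
      ¬(0 < t ∧ cs.getD (t-1) ' ' = 'N')) := by
  unfold St
  rw [show t+2-2 = t by omega, show t+2-3 = t-1 by omega]
  constructor
  · rintro ⟨_, _, hM, hN, hp⟩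
    exact ⟨hM, hN, fun ⟨h0, hc⟩ => hp ⟨by omega, hc⟩⟩
  · rintro ⟨hM, hN, hp⟩
    exact ⟨by omega, by omega, hM, hN, fun ⟨h3, hc⟩ => hp ⟨by omega, hc⟩⟩

lemma proj_keep (cs : List Char) (t : Nat) (ht : t < cs.length) :
    projA (state cs cs.length (t+2)) =
      if keep cs t then some (cs.getD t ' ') else none := by
  by_cases hk : keep cs t
  · rw [if_pos hk]
    obtain ⟨h1, h2, h3, h4, h5⟩ := hk
    unfold state
    rw [if_neg, if_pos]
    · rw [show t+2-2 = t by omega]; rfl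
    · exact (St_final cs t ht).mpr ⟨h1, h2, h5⟩
    · rw [Z_final cs t ht]
      rintro (h | h | h)
      exacts [h4 h, h3 h, h5 h]
  · rw [if_neg hk]
    by_cases hz : Z cs cs.length (t+2)
    · unfold state; rw [if_pos hz]; rfl
    · apply projA_of_not_St
      rw [St_final cs t ht]
      rintro ⟨h1, h2, h5⟩
      apply hk
      rw [Z_final cs t ht] at hz
      rw [not_or, not_or] at hz
      obtain ⟨hz1, hz2, hz3⟩ := hz
      exact ⟨h1, h2, hz2, hz1, h5⟩

lemma A_map_eq (cs : List Char) :
    ((List.range (cs.length+3)).map (state cs cs.length)).filterMap projA =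
      (List.range cs.length).filterMap
        (fun t => if keep cs t then some (cs.getD t ' ') else none) := by
  rw [List.filterMap_map]
  rw [show cs.length + 3 = 2 + (cs.length + 1) by omega, List.range_add,
      List.filterMap_append, List.filterMap_map]
  have h01 : (List.range 2).filterMap (projA ∘ state cs cs.length) = [] := by
    apply List.filterMap_eq_nil_iff.mpr
    intro a ha
    have : a < 2 := List.mem_range.mp ha
    exact projA_of_not_St cs cs.length a (by rintro ⟨h, _⟩; omega)
  rw [h01, List.nil_append, List.range_succ, List.filterMap_append]
  have hn : [cs.length].filterMap ((projA ∘ state cs cs.length) ∘ (fun x => 2 + x)) = [] := by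
    apply List.filterMap_eq_nil_iff.mpr
    intro a ha
    rw [List.mem_singleton.mp ha]
    exact projA_of_not_St cs cs.length (2 + cs.length) (by rintro ⟨_, h, _⟩; omega)
  rw [hn, List.append_nil]
  apply List.filterMap_congr
  intro t htm
  have ht : t < cs.length := List.mem_range.mp htm
  show projA (state cs cs.length (2 + t)) = _
  rw [show 2 + t = t + 2 by omega]
  exact proj_keep cs t ht

lemma A_list_eq (cs : List Char) :
    ((List.range cs.length).foldl (removeNMaroundStep cs)
        (List.replicate (cs.length + 3) none)).filterMap projA =
      (List.range cs.length).filterMap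
        (fun t => if keep cs t then some (cs.getD t ' ') else none) := by
  rw [loopA_eq cs cs.length le_rfl]
  exact A_map_eq cs

lemma enumerate_eq_map_range {α : Type} (d : α) (xs : List α) :
    ∀ (s : Int), PySem.List.enumerate xs s =
      (List.range xs.length).map (fun (t : Nat) => ((s + (t:Int), xs.getD t d) : Int × α)) := by
  induction xs with
  | nil => intro s; simp [PySem.List.enumerate_nil]
  | cons x xs ih =>
    intro s
    rw [PySem.List.enumerate_cons, ih (s+1)]
    simp only [List.length_cons, List.range_succ_eq_map, List.map_cons, List.map_map]
    refine List.cons_eq_cons.mpr ⟨by simp, ?_⟩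
    apply List.map_congr_left
    intro t _
    simp only [Function.comp]
    refine Prod.ext ?_ ?_
    · show s + 1 + (t:Int) = s + ((t.succ : Nat) : Int)
      push_cast; ring
    · show xs.getD t d = (x :: xs).getD t.succ d
      rfl

lemma B_list_eq (cs : List Char) :
    ((PySem.List.enumerate cs).filterMap (fun p =>
      if p.2 ≠ 'M' ∧ p.2 ≠ 'N' ∧
         ¬(p.1 + 1 < (cs.length : Int) ∧ PySem.List.pyGetD cs (p.1 + 1) ' ' = 'M') ∧
         ¬(p.1 + 2 < (cs.length : Int) ∧ PySem.List.pyGetD cs (p.1 + 2) ' ' = 'M') ∧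
         ¬(p.1 > 0 ∧ PySem.List.pyGetD cs (p.1 - 1) ' ' = 'N')
      then some p.2 else none)) =
      (List.range cs.length).filterMap
        (fun t => if keep cs t then some (cs.getD t ' ') else none) := by
  rw [enumerate_eq_map_range ' ' cs 0, List.filterMap_map]
  apply List.filterMap_congr
  intro t htm
  have ht : t < cs.length := List.mem_range.mp htm
  simp only [Function.comp]
  have e1 : (0:Int) + (t:Int) + 1 = ((t+1 : Nat) : Int) := by push_cast; ring
  have e2 : (0:Int) + (t:Int) + 2 = ((t+2 : Nat) : Int) := by push_cast; ring
  apply if_congr _ rfl rfl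
  rw [e1, e2, PySem.List.pyGetD_natCast, PySem.List.pyGetD_natCast]
  constructor
  · rintro ⟨h1, h2, h3, h4, h5⟩
    refine ⟨h1, h2, ?_, ?_, ?_⟩
    · rintro ⟨ha, hb⟩; exact h3 ⟨by exact_mod_cast ha, hb⟩
    · rintro ⟨ha, hb⟩; exact h4 ⟨by exact_mod_cast ha, hb⟩
    · rintro ⟨ha, hb⟩
      apply h5
      refine ⟨by omega, ?_⟩
      rwa [show (0:Int) + (t:Int) - 1 = ((t-1 : Nat) : Int) by omega, PySem.List.pyGetD_natCast]
  · rintro ⟨h1, h2, h3, h4, h5⟩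
    refine ⟨h1, h2, ?_, ?_, ?_⟩
    · rintro ⟨ha, hb⟩; exact h3 ⟨by exact_mod_cast ha, hb⟩
    · rintro ⟨ha, hb⟩; exact h4 ⟨by exact_mod_cast ha, hb⟩
    · rintro ⟨ha, hb⟩
      have ht0 : 0 < t := by omega
      apply h5
      refine ⟨by omega, ?_⟩
      rwa [show (0:Int) + (t:Int) - 1 = ((t-1 : Nat) : Int) by omega, PySem.List.pyGetD_natCast] at hb

-- ===== VERDICT (by name: the statement is the Claim_ definition above) =====
theorem removeNMaround_spec : Claim_equal_removeNMaround := by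
  intro s _
  unfold Spec_removeNMaround removeNMaround removeNMaround_alt
  simp only
  rw [show (fun e => match e with | some (some c) => some c | _ => none) = projA from rfl]
  rw [A_list_eq, ← B_list_eq]
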